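-- pv_equiv track=rewrite | github.com/maguedon/codingup | 2024/python/message_espace.py | isSequenceRare
-- ===== SOURCE A (Python) =====
-- def isSequenceRare(sequence):
--     for i in range(len(sequence)-1):
--         char = sequence[i]
--         if i < len(sequence) - 1 and char == sequence[i+1]:
--             return False
--         if i < len(sequence) - 2 and char == sequence[i+2]:
--             return False
--         if i < len(sequence) - 3 and char == sequence[i+3]:
--             return False
--     return True
-- ===== SOURCE B (Python) =====
-- def isSequenceRare(sequence):
--     recent = []
--     for e in sequence:
--         if e in recent:
--             return False
--         recent.append(e)
--         recent = recent[-3:]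
--     return True
-- ===== Notes on version B (the rewrite author's own statement) =====
-- stated objective: simpler
-- what changed: A tests each position forward against the next three positions with three unrolled guarded comparisons; B makes one pass keeping a sliding window of the last up-to-3 seen characters and tests each character by a single membership check against that window.
import Mathlib
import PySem

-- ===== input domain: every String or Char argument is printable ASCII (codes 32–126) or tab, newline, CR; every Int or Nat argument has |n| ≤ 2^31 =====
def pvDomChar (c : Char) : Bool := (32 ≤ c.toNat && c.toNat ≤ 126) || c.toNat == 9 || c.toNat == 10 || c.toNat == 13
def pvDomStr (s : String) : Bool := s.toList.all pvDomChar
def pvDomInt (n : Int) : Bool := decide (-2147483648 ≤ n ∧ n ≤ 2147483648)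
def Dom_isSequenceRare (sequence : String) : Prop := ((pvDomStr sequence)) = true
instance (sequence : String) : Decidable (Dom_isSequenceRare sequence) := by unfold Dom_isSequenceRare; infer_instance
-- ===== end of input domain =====

-- B replaces A's three unrolled forward comparisons per index by a single backward
-- membership test against a sliding window of the last ≤3 characters (objective: simpler).

-- ===== PORT A =====
-- the for-loop over range(len(sequence)-1); every index access A performs is in
-- range (each is guarded by the bound it needs), so sequence[i+k] is transliterated as getD
def isSequenceRareGo (s : List Char) (i : Nat) : Bool :=
  if i < s.length - 1 then
    let char := s.getD i ' '
    if i < s.length - 1 && (char == s.getD (i+1) ' ') then false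
    else if i < s.length - 2 && (char == s.getD (i+2) ' ') then false
    else if i < s.length - 3 && (char == s.getD (i+3) ' ') then false
    else isSequenceRareGo s (i+1)
  else true
termination_by s.length - i
decreasing_by omega

def isSequenceRare (sequence : String) : Bool :=
  isSequenceRareGo sequence.toList 0

-- ===== PORT B =====
-- the for-loop over the characters; recent[-3:] is transliterated as drop (length - 3)
def isSequenceRareAltGo (recent : List Char) (l : List Char) : Bool :=
  match l with
  | [] => true
  | e :: rest =>
    if recent.contains e then false
    else
      let r := recent ++ [e]
      isSequenceRareAltGo (r.drop (r.length - 3)) rest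

def isSequenceRare_alt (sequence : String) : Bool :=
  isSequenceRareAltGo [] sequence.toList

-- ===== PRECONDITION & SPEC =====
def Spec_isSequenceRare (sequence : String) (out : Bool) : Prop := out = isSequenceRare_alt sequence
instance (sequence : String) (out : Bool) : Decidable (Spec_isSequenceRare sequence out) := by unfold Spec_isSequenceRare; infer_instance

-- ===== CLAIM (what is proved, stated in full; the proofs are below) =====
def Claim_equal_isSequenceRare : Prop := ∀ (sequence : String), Dom_isSequenceRare sequence → Spec_isSequenceRare sequence (isSequenceRare sequence)

-- ===== LEMMAS AND PROOFS =====

-- "no equal pair at distance 1..3 whose left index is ≥ i" (A's loop checks forward)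
def PShift (t : List Char) (i : Nat) : Prop :=
  ∀ k d : Nat, i ≤ k → 1 ≤ d → d ≤ 3 → k + d < t.length → t.getD k ' ' ≠ t.getD (k+d) ' '

-- "no equal pair at distance 1..3 whose right index is ≥ i" (B's loop checks backward)
def QShift (t : List Char) (i : Nat) : Prop :=
  ∀ k d : Nat, i ≤ k + d → 1 ≤ d → d ≤ 3 → k + d < t.length → t.getD k ' ' ≠ t.getD (k+d) ' '

lemma PShift_step (t : List Char) (i : Nat)
    (h1 : ¬ (i + 1 < t.length ∧ t.getD i ' ' = t.getD (i+1) ' '))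
    (h2 : ¬ (i + 2 < t.length ∧ t.getD i ' ' = t.getD (i+2) ' '))
    (h3 : ¬ (i + 3 < t.length ∧ t.getD i ' ' = t.getD (i+3) ' ')) :
    PShift t (i+1) ↔ PShift t i := by
  constructor
  · intro h k d hik h1d h3d hlt
    rcases Nat.lt_or_ge i k with hik' | hik'
    · exact h k d hik' h1d h3d hlt
    · have hk : k = i := by omega
      subst hk
      interval_cases d
      · exact fun he => h1 ⟨hlt, he⟩
      · exact fun he => h2 ⟨hlt, he⟩
      · exact fun he => h3 ⟨hlt, he⟩
  · intro h k d hik h1d h3d hlt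
    exact h k d (by omega) h1d h3d hlt

lemma goA_iff_aux (t : List Char) : ∀ (m i : Nat), t.length - i ≤ m →
    (isSequenceRareGo t i = true ↔ PShift t i) := by
  intro m
  induction m with
  | zero =>
    intro i him
    rw [isSequenceRareGo]
    have : ¬ i < t.length - 1 := by omega
    simp only [this, if_false, true_iff]
    intro k d hik h1d h3d hlt; omega
  | succ m ih =>
    intro i him
    rw [isSequenceRareGo]
    by_cases hlt : i < t.length - 1
    · rw [if_pos hlt]
      by_cases b1 : t.getD i ' ' = t.getD (i+1) ' '
      · have hc1 : (decide (i < t.length - 1) && (t.getD i ' ' == t.getD (i+1) ' ')) = true := by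
          rw [decide_eq_true hlt, beq_iff_eq.mpr b1]; rfl
        simp only [hc1]; rw [if_pos trivial]
        constructor
        · intro h; exact absurd h Bool.false_ne_true
        · intro hP; exact absurd b1 (hP i 1 le_rfl le_rfl (by omega) (by omega))
      · have hc1 : (decide (i < t.length - 1) && (t.getD i ' ' == t.getD (i+1) ' ')) = false := by
          rw [beq_eq_false_iff_ne.mpr b1, Bool.and_false]
        simp only [hc1]; rw [if_neg Bool.false_ne_true]
        by_cases g2 : i < t.length - 2 ∧ t.getD i ' ' = t.getD (i+2) ' '
        · have hc2 : (decide (i < t.length - 2) && (t.getD i ' ' == t.getD (i+2) ' ')) = true := by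
            rw [decide_eq_true g2.1, beq_iff_eq.mpr g2.2]; rfl
          simp only [hc2]; rw [if_pos trivial]
          constructor
          · intro h; exact absurd h Bool.false_ne_true
          · intro hP; exact absurd g2.2 (hP i 2 le_rfl (by omega) (by omega) (by omega))
        · have hc2 : (decide (i < t.length - 2) && (t.getD i ' ' == t.getD (i+2) ' ')) = false := by
            rcases Decidable.not_and_iff_not_or_not.mp g2 with h | h
            · rw [decide_eq_false h, Bool.false_and]
            · rw [beq_eq_false_iff_ne.mpr h, Bool.and_false]
          simp only [hc2]; rw [if_neg Bool.false_ne_true]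
          by_cases g3 : i < t.length - 3 ∧ t.getD i ' ' = t.getD (i+3) ' '
          · have hc3 : (decide (i < t.length - 3) && (t.getD i ' ' == t.getD (i+3) ' ')) = true := by
              rw [decide_eq_true g3.1, beq_iff_eq.mpr g3.2]; rfl
            simp only [hc3]; rw [if_pos trivial]
            constructor
            · intro h; exact absurd h Bool.false_ne_true
            · intro hP; exact absurd g3.2 (hP i 3 le_rfl (by omega) (by omega) (by omega))
          · have hc3 : (decide (i < t.length - 3) && (t.getD i ' ' == t.getD (i+3) ' ')) = false := by
              rcases Decidable.not_and_iff_not_or_not.mp g3 with h | h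
              · rw [decide_eq_false h, Bool.false_and]
              · rw [beq_eq_false_iff_ne.mpr h, Bool.and_false]
            simp only [hc3]; rw [if_neg Bool.false_ne_true]
            rw [ih (i+1) (by omega)]
            exact PShift_step t i (fun h => b1 h.2)
              (fun h => g2 ⟨by omega, h.2⟩) (fun h => g3 ⟨by omega, h.2⟩)
    · rw [if_neg hlt]
      simp only [true_iff]
      intro k d hik h1d h3d hl; omega

lemma goA_iff (t : List Char) (i : Nat) : isSequenceRareGo t i = true ↔ PShift t i :=
  goA_iff_aux t (t.length - i) i le_rfl

lemma window_length (t : List Char) (i : Nat) (hi : i ≤ t.length) :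
    ((t.take i).drop (i-3)).length = min i 3 := by
  simp [List.length_drop, List.length_take]; omega

lemma window_getD (t : List Char) (i j : Nat) (hi : i ≤ t.length) (hj : j < min i 3) :
    ((t.take i).drop (i-3)).getD j ' ' = t.getD (i-3+j) ' ' := by
  have h1 : j < ((t.take i).drop (i-3)).length := by rw [window_length t i hi]; exact hj
  have h2 : i-3+j < t.length := by omega
  rw [List.getD_eq_getElem _ _ h1, List.getD_eq_getElem _ _ h2]
  simp [List.getElem_drop, List.getElem_take]

lemma window_mem (t : List Char) (i : Nat) (hi : i ≤ t.length) (c : Char) :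
    c ∈ (t.take i).drop (i-3) ↔ ∃ k, k < i ∧ i ≤ k + 3 ∧ t.getD k ' ' = c := by
  rw [List.mem_iff_getElem]
  constructor
  · rintro ⟨j, hj, hget⟩
    have hj' : j < min i 3 := by rwa [window_length t i hi] at hj
    refine ⟨i-3+j, by omega, by omega, ?_⟩
    rw [← window_getD t i j hi hj', List.getD_eq_getElem _ _ hj]
    exact hget
  · rintro ⟨k, hk, hk3, hget⟩
    have hj' : k - (i-3) < min i 3 := by omega
    refine ⟨k - (i-3), by rw [window_length t i hi]; exact hj', ?_⟩
    rw [← List.getD_eq_getElem _ ' ', window_getD t i _ hi hj']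
    rw [show i-3+(k-(i-3)) = k by omega]; exact hget

lemma window_succ (t : List Char) (i : Nat) (hi : i < t.length) :
    (((t.take i).drop (i-3) ++ [t.getD i ' ']).drop
        (((t.take i).drop (i-3) ++ [t.getD i ' ']).length - 3))
      = (t.take (i+1)).drop (i+1-3) := by
  have hlen : ((t.take i).drop (i-3)).length = min i 3 := window_length t i (by omega)
  have ht1 : t.take (i+1) = t.take i ++ [t.getD i ' '] := by
    rw [List.take_add_one, List.getElem?_eq_getElem hi, List.getD_eq_getElem _ _ hi]
    rfl
  rw [ht1, List.length_append, hlen]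
  have hq : min i 3 + [t.getD i ' '].length - 3 ≤ ((t.take i).drop (i-3)).length := by
    rw [hlen]; simp only [List.length_cons, List.length_nil]; omega
  rw [List.drop_append_of_le_length hq, List.drop_drop]
  rw [List.drop_append_of_le_length (by simp only [List.length_take]; omega)]
  congr 1
  simp only [List.length_cons, List.length_nil]
  congr 1
  omega

lemma goB_iff_aux (t : List Char) : ∀ (m i : Nat), t.length - i ≤ m → i ≤ t.length →
    (isSequenceRareAltGo ((t.take i).drop (i-3)) (t.drop i) = true ↔ QShift t i) := by
  intro m
  induction m with
  | zero =>
    intro i h1 h2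
    have : i = t.length := by omega
    subst this
    rw [List.drop_length]
    simp only [isSequenceRareAltGo, true_iff]
    intro k d hkd h1d h3d hlt; omega
  | succ m ih =>
    intro i h1 h2
    by_cases hi : i < t.length
    · have hdrop : t.drop i = t.getD i ' ' :: t.drop (i+1) := by
        rw [List.drop_eq_getElem_cons hi, List.getD_eq_getElem _ _ hi]
      rw [hdrop]
      simp only [isSequenceRareAltGo]
      by_cases hc : t.getD i ' ' ∈ (t.take i).drop (i-3)
      · rw [if_pos (List.contains_iff_mem.mpr hc)]
        constructor
        · intro h; exact absurd h Bool.false_ne_true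
        · intro hQ
          rcases (window_mem t i (by omega) _).mp hc with ⟨k, hk, hk3, hget⟩
          exact absurd hget (by
            have := hQ k (i - k) (by omega) (by omega) (by omega) (by omega)
            rw [show k + (i - k) = i by omega] at this
            exact this)
      · rw [if_neg (fun h => hc (List.contains_iff_mem.mp h))]
        rw [window_succ t i hi]
        rw [ih (i+1) (by omega) (by omega)]
        constructor
        · intro h k d hkd h1d h3d hlt
          by_cases hkd' : i + 1 ≤ k + d
          · exact h k d hkd' h1d h3d hlt
          · have hkdi : k + d = i := by omega
            intro heq
            apply hc
            rw [← hkdi]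
            refine (window_mem t (k+d) (by omega) _).mpr ⟨k, by omega, by omega, ?_⟩
            rw [heq, hkdi]
        · intro h k d hkd h1d h3d hlt
          exact h k d (by omega) h1d h3d hlt
    · have : i = t.length := by omega
      subst this
      rw [List.drop_length]
      simp only [isSequenceRareAltGo, true_iff]
      intro k d hkd h1d h3d hlt; omega

lemma goB_iff (t : List Char) : isSequenceRareAltGo [] t = true ↔ QShift t 0 := by
  have := goB_iff_aux t t.length 0 (by omega) (by omega)
  simpa using this

-- ===== VERDICT (by name: the statement is the Claim_ definition above) =====
theorem isSequenceRare_spec : Claim_equal_isSequenceRare := by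
  intro s _
  unfold Spec_isSequenceRare isSequenceRare isSequenceRare_alt
  have hA := goA_iff s.toList 0
  have hB := goB_iff s.toList
  have hPQ : PShift s.toList 0 ↔ QShift s.toList 0 := by
    constructor
    · intro h k d _ h1 h3 hlt; exact h k d (Nat.zero_le _) h1 h3 hlt
    · intro h k d _ h1 h3 hlt; exact h k d (Nat.zero_le _) h1 h3 hlt
  have hiff := hA.trans (hPQ.trans hB.symm)
  cases hgoA : isSequenceRareGo s.toList 0 <;>
  cases hgoB : isSequenceRareAltGo [] s.toList <;> simp_all
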